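-- pv_equiv track=rewrite | github.com/shaunthebuilder/Open-GR-WM | app.py | extract_balanced_block
-- ===== SOURCE A (Python) =====
-- from typing import Callable, Dict, List, Optional, Tuple
--
-- def extract_balanced_block(text: str, start_at: int, opening: str, closing: str) -> Tuple[str, int, int]:
--     if not text or start_at >= len(text):
--         return "", -1, -1
--     i = start_at
--     while i < len(text) and text[i].isspace():
--         i += 1
--     if i >= len(text) or text[i] != opening:
--         return "", -1, -1
--     depth = 0
--     quote_char = ""
--     escaped = False
--     for j in range(i, len(text)):
--         ch = text[j]
--         if quote_char:
--             if escaped: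
--                 escaped = False
--                 continue
--             if ch == "\\":
--                 escaped = True
--                 continue
--             if ch == quote_char:
--                 quote_char = ""
--             continue
--         if ch in {"'", '"'}:
--             quote_char = ch
--             continue
--         if ch == opening:
--             depth += 1
--             continue
--         if ch == closing:
--             depth -= 1
--             if depth == 0:
--                 return text[i : j + 1], i, j + 1
--     return "", -1, -1
-- ===== SOURCE B (Python) =====
-- def _bracket_events(seq, opening, closing):
--     events = []
--     k = 0
--     m = len(seq)
--     while k < m:
--         j, c = seq[k]
--         if c == "'" or c == '"':
--             k += 1
--             while k < m:
--                 d = seq[k][1]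
--                 if d == "\\":
--                     k += 2
--                 elif d == c:
--                     k += 1
--                     break
--                 else:
--                     k += 1
--         elif c == opening:
--             events.append((j, True))
--             k += 1
--         elif c == closing:
--             events.append((j, False))
--             k += 1
--         else:
--             k += 1
--     return events
--
--
-- def extract_balanced_block(text, start_at, opening, closing):
--     n = len(text)
--     if not text or start_at >= n:
--         return "", -1, -1
--     i = n
--     for j in range(start_at, n):
--         if not text[j].isspace():
--             i = j
--             break
--     if i >= n or text[i] != opening:
--         return "", -1, -1
--     seq = [(j, text[j]) for j in range(i, n)]
--     depth = 0
--     for j, is_open in _bracket_events(seq, opening, closing):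
--         if is_open:
--             depth += 1
--         else:
--             depth -= 1
--             if depth == 0:
--                 return text[i:j + 1], i, j + 1
--     return "", -1, -1
-- ===== Notes on version B (the rewrite author's own statement) =====
-- stated objective: alternative
-- what changed: Replaced A's single flag-based state machine (quote_char/escaped booleans with an early return inside the scan) by a staged two-pass design: pass 1 collects the bracket events outside quoted strings into a list (quotes consumed by a nested skip with j+=2 on backslash), pass 2 folds over that event list tracking depth and picks the first closing event where depth reaches zero.
import Mathlib
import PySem

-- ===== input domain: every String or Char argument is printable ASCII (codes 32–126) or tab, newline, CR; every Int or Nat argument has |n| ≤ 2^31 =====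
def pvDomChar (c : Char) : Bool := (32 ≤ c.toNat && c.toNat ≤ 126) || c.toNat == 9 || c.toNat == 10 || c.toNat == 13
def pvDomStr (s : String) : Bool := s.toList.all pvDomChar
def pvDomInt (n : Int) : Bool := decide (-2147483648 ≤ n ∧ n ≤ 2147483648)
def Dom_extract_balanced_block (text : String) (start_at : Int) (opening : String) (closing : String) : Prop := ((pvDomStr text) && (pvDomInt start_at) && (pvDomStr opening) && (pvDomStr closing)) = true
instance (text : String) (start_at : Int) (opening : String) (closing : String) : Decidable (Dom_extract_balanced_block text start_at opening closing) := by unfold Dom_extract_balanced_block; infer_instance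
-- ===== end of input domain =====

-- ===== PORT A =====
-- B replaces A's single flag-based scan (quote_char/escaped booleans, early return) by a
-- staged two-pass design: collect bracket events outside quotes, then fold over them for
-- the depth; objective: alternative decomposition, same O(n) cost.
-- The Nat `fuel` arguments only make A's while/for loops total; each call supplies enough fuel.
-- A's leading-whitespace while loop.
def pvSkipWs (cs : List Char) : Nat → Int → Int
  | 0, i => i
  | fuel + 1, i =>
    if i < (cs.length : Int) ∧ PySem.Chars.isspace (PySem.List.pyGetD cs i ' ') = true then
      pvSkipWs cs fuel (i + 1)
    else i

-- A's for-loop over j in range(i, len(text)) with state (depth, quote_char, escaped);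
-- returns the index j of the early return (some j) or none for the fall-through sentinel.
def pvALoop (cs op cl : List Char) : Nat → Int → Int → Option Char → Bool → Option Int
  | 0, _, _, _, _ => none
  | fuel + 1, j, depth, quote, escaped =>
    if j < (cs.length : Int) then
      let ch := PySem.List.pyGetD cs j ' '
      match quote with
      | some q =>
        if escaped then pvALoop cs op cl fuel (j + 1) depth (some q) false
        else if ch = '\\' then pvALoop cs op cl fuel (j + 1) depth (some q) true
        else if ch = q then pvALoop cs op cl fuel (j + 1) depth none false
        else pvALoop cs op cl fuel (j + 1) depth (some q) false
      | none =>
        if ch = '\'' ∨ ch = '"' then pvALoop cs op cl fuel (j + 1) depth (some ch) false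
        else if [ch] = op then pvALoop cs op cl fuel (j + 1) (depth + 1) none false
        else if [ch] = cl then
          if depth - 1 = 0 then some j else pvALoop cs op cl fuel (j + 1) (depth - 1) none false
        else pvALoop cs op cl fuel (j + 1) depth none false
    else none

def extract_balanced_block (text : String) (start_at : Int) (opening : String)
    (closing : String) : String × Int × Int :=
  let cs := text.toList
  if cs = [] ∨ (cs.length : Int) ≤ start_at then ("", -1, -1)
  else
    let i := pvSkipWs cs ((cs.length : Int) - start_at).toNat start_at
    if (cs.length : Int) ≤ i ∨ [PySem.List.pyGetD cs i ' '] ≠ opening.toList then ("", -1, -1)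
    else
      match pvALoop cs opening.toList closing.toList ((cs.length : Int) - i).toNat i 0 none false with
      | some j => (PySem.Str.slice text (some i) (some (j + 1)), i, j + 1)
      | none => ("", -1, -1)

-- ===== PORT B =====
-- B's whitespace skip: the first index in range(start_at, n) whose char is not a space, default n.
def pvFirstNonWs (cs : List Char) : List Int → Int
  | [] => (cs.length : Int)
  | j :: rest =>
    if PySem.Chars.isspace (PySem.List.pyGetD cs j ' ') = true then pvFirstNonWs cs rest else j

-- B's inner quote-consuming skip: drops the rest of a quoted string opened by q
-- (two at a time after a backslash), returning the remaining (index, char) suffix.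
def pvSkipQuote (q : Char) : List (Int × Char) → List (Int × Char)
  | [] => []
  | (_, d) :: rest =>
    if d = '\\' then
      match rest with
      | [] => []
      | _ :: rest' => pvSkipQuote q rest'
    else if d = q then rest
    else pvSkipQuote q rest

theorem pvSkipQuote_length_le (q : Char) : ∀ l : List (Int × Char), (pvSkipQuote q l).length ≤ l.length
  | [] => by simp [pvSkipQuote]
  | (j, d) :: rest => by
    rw [pvSkipQuote.eq_def]
    dsimp only
    by_cases h1 : d = '\\'
    · rw [if_pos h1]
      cases rest with
      | nil => simp
      | cons x rest' =>
        have h := pvSkipQuote_length_le q rest'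
        simp only [List.length_cons]
        omega
    · rw [if_neg h1]
      by_cases h2 : d = q
      · rw [if_pos h2]
        simp only [List.length_cons]
        omega
      · rw [if_neg h2]
        have h := pvSkipQuote_length_le q rest
        simp only [List.length_cons]
        omega

-- B's pass 1: the bracket events ((index, True) = opening, (index, False) = closing)
-- occurring outside quoted strings.
def pvEvents (op cl : List Char) : List (Int × Char) → List (Int × Bool)
  | [] => []
  | (j, c) :: rest =>
    if c = '\'' ∨ c = '"' then pvEvents op cl (pvSkipQuote c rest)
    else if [c] = op then (j, true) :: pvEvents op cl rest
    else if [c] = cl then (j, false) :: pvEvents op cl rest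
    else pvEvents op cl rest
termination_by l => l.length
decreasing_by
  · simpa using Nat.lt_succ_of_le (pvSkipQuote_length_le c rest)
  · simp
  · simp
  · simp

-- B's pass 2: fold over the events with a depth accumulator; first closing event
-- where the depth reaches zero wins.
def pvFind : List (Int × Bool) → Int → Option Int
  | [], _ => none
  | (j, b) :: rest, depth =>
    if b then pvFind rest (depth + 1)
    else if depth - 1 = 0 then some j else pvFind rest (depth - 1)

def extract_balanced_block_alt (text : String) (start_at : Int) (opening : String)
    (closing : String) : String × Int × Int :=
  let cs := text.toList
  if cs = [] ∨ (cs.length : Int) ≤ start_at then ("", -1, -1)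
  else
    let i := pvFirstNonWs cs (PySem.List.pyRange start_at (cs.length : Int) 1)
    if (cs.length : Int) ≤ i ∨ [PySem.List.pyGetD cs i ' '] ≠ opening.toList then ("", -1, -1)
    else
      let seq := (PySem.List.pyRange i (cs.length : Int) 1).map
        (fun j => (j, PySem.List.pyGetD cs j ' '))
      match pvFind (pvEvents opening.toList closing.toList seq) 0 with
      | some j => (PySem.Str.slice text (some i) (some (j + 1)), i, j + 1)
      | none => ("", -1, -1)

-- ===== PRECONDITION & SPEC =====
-- Pre_ excludes only the inputs where Python A raises IndexError: a nonempty text with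
-- start_at < -len(text) (text[start_at] in the whitespace loop); B raises there too.
def Pre_extract_balanced_block (text : String) (start_at : Int) (opening : String)
    (closing : String) : Prop :=
  text.toList = [] ∨ -(text.toList.length : Int) ≤ start_at

instance (text : String) (start_at : Int) (opening : String) (closing : String) :
    Decidable (Pre_extract_balanced_block text start_at opening closing) := by
  unfold Pre_extract_balanced_block; infer_instance

def pvWitness_extract_balanced_block : String × Int × String × String := ("  (a('\\)')b)", 0, "(", ")")

def Spec_extract_balanced_block (text : String) (start_at : Int) (opening : String) (closing : String) (out : String × Int × Int) : Prop := out = extract_balanced_block_alt text start_at opening closing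
instance (text : String) (start_at : Int) (opening : String) (closing : String) (out : String × Int × Int) : Decidable (Spec_extract_balanced_block text start_at opening closing out) := by
  unfold Spec_extract_balanced_block; infer_instance

-- ===== CLAIM (what is proved, stated in full; the proofs are below) =====
def Claim_equal_extract_balanced_block : Prop := ∀ (text : String) (start_at : Int) (opening : String) (closing : String), Dom_extract_balanced_block text start_at opening closing → Pre_extract_balanced_block text start_at opening closing → Spec_extract_balanced_block text start_at opening closing (extract_balanced_block text start_at opening closing)

-- ===== LEMMAS AND PROOFS =====
-- the (index, char) suffix of the text scanned by B from position j
def pvPairs (cs : List Char) (j : Int) : List (Int × Char) :=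
  (PySem.List.pyRange j (cs.length : Int) 1).map (fun k => (k, PySem.List.pyGetD cs k ' '))

theorem pvPairs_nil (cs : List Char) (j : Int) (h : (cs.length : Int) ≤ j) :
    pvPairs cs j = [] := by
  simp [pvPairs, PySem.List.pyRange_one_eq_nil h]

theorem pvPairs_cons (cs : List Char) (j : Int) (h : j < (cs.length : Int)) :
    pvPairs cs j = (j, PySem.List.pyGetD cs j ' ') :: pvPairs cs (j + 1) := by
  simp [pvPairs, PySem.List.pyRange_one_cons h]

theorem pvALoop_stop (cs op cl : List Char) (fa : Nat) (j depth : Int) (quote : Option Char)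
    (escaped : Bool) (hj : ¬ j < (cs.length : Int)) :
    pvALoop cs op cl fa j depth quote escaped = none := by
  cases fa <;> simp [pvALoop, hj]

theorem pvSkipQuote_nil (q : Char) : pvSkipQuote q [] = [] := rfl

theorem pvSkipQuote_bs_nil (q : Char) (j : Int) (d : Char) (h : d = '\\') :
    pvSkipQuote q [(j, d)] = [] := by
  rw [pvSkipQuote.eq_def]; dsimp only; rw [if_pos h]

theorem pvSkipQuote_bs_cons (q : Char) (j : Int) (d : Char) (x : Int × Char)
    (rest' : List (Int × Char)) (h : d = '\\') :
    pvSkipQuote q ((j, d) :: x :: rest') = pvSkipQuote q rest' := by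
  rw [pvSkipQuote.eq_def]; dsimp only; rw [if_pos h]

theorem pvSkipQuote_close (q : Char) (j : Int) (d : Char) (rest : List (Int × Char))
    (h1 : ¬ d = '\\') (h2 : d = q) :
    pvSkipQuote q ((j, d) :: rest) = rest := by
  rw [pvSkipQuote.eq_def]; dsimp only; rw [if_neg h1, if_pos h2]

theorem pvSkipQuote_other (q : Char) (j : Int) (d : Char) (rest : List (Int × Char))
    (h1 : ¬ d = '\\') (h2 : ¬ d = q) :
    pvSkipQuote q ((j, d) :: rest) = pvSkipQuote q rest := by
  rw [pvSkipQuote.eq_def]; dsimp only; rw [if_neg h1, if_neg h2]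

theorem pvEvents_nil (op cl : List Char) : pvEvents op cl [] = [] := by rw [pvEvents]

theorem pvEvents_quote (op cl : List Char) (j : Int) (c : Char) (rest : List (Int × Char))
    (h : c = '\'' ∨ c = '"') :
    pvEvents op cl ((j, c) :: rest) = pvEvents op cl (pvSkipQuote c rest) := by
  rw [pvEvents, if_pos h]

theorem pvEvents_open (op cl : List Char) (j : Int) (c : Char) (rest : List (Int × Char))
    (h : ¬ (c = '\'' ∨ c = '"')) (hop : [c] = op) :
    pvEvents op cl ((j, c) :: rest) = (j, true) :: pvEvents op cl rest := by
  rw [pvEvents, if_neg h, if_pos hop]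

theorem pvEvents_close (op cl : List Char) (j : Int) (c : Char) (rest : List (Int × Char))
    (h : ¬ (c = '\'' ∨ c = '"')) (hop : ¬ [c] = op) (hcl : [c] = cl) :
    pvEvents op cl ((j, c) :: rest) = (j, false) :: pvEvents op cl rest := by
  rw [pvEvents, if_neg h, if_neg hop, if_pos hcl]

theorem pvEvents_skip (op cl : List Char) (j : Int) (c : Char) (rest : List (Int × Char))
    (h : ¬ (c = '\'' ∨ c = '"')) (hop : ¬ [c] = op) (hcl : ¬ [c] = cl) :
    pvEvents op cl ((j, c) :: rest) = pvEvents op cl rest := by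
  rw [pvEvents, if_neg h, if_neg hop, if_neg hcl]

theorem pvFind_nil (depth : Int) : pvFind [] depth = none := rfl

theorem pvFind_open (j depth : Int) (rest : List (Int × Bool)) :
    pvFind ((j, true) :: rest) depth = pvFind rest (depth + 1) := rfl

theorem pvFind_close (j depth : Int) (rest : List (Int × Bool)) :
    pvFind ((j, false) :: rest) depth =
      if depth - 1 = 0 then some j else pvFind rest (depth - 1) := rfl

-- A's whitespace while loop computes B's first-non-space index
theorem pvSkipWs_eq (cs : List Char) :
    ∀ (fuel : Nat) (i : Int), i ≤ (cs.length : Int) → ((cs.length : Int) - i).toNat ≤ fuel →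
      pvSkipWs cs fuel i = pvFirstNonWs cs (PySem.List.pyRange i (cs.length : Int) 1) := by
  intro fuel
  induction fuel with
  | zero =>
    intro i hle hf
    have : i = (cs.length : Int) := by omega
    subst this
    simp [pvSkipWs, pvFirstNonWs, PySem.List.pyRange_one_eq_nil le_rfl]
  | succ fuel ih =>
    intro i hle hf
    by_cases hi : i < (cs.length : Int)
    · rw [PySem.List.pyRange_one_cons hi]
      by_cases hs : PySem.Chars.isspace (PySem.List.pyGetD cs i ' ') = true
      · simp only [pvSkipWs, pvFirstNonWs, hi, hs, and_self, if_true]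
        exact ih (i + 1) (by omega) (by omega)
      · simp [pvSkipWs, pvFirstNonWs, hi, hs]
    · have : i = (cs.length : Int) := by omega
      subst this
      simp [pvSkipWs, pvFirstNonWs, PySem.List.pyRange_one_eq_nil le_rfl]

-- simultaneous simulation: A's loop (outside / inside a quote) equals B's
-- find-over-events of the remaining suffix (resp. of the suffix past the quote)
theorem pvSim (cs op cl : List Char) : ∀ m : Nat,
    (∀ (fa : Nat) (j depth : Int),
      ((cs.length : Int) - j).toNat ≤ m → ((cs.length : Int) - j).toNat ≤ fa →
      pvALoop cs op cl fa j depth none false = pvFind (pvEvents op cl (pvPairs cs j)) depth)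
    ∧ (∀ (fa : Nat) (j depth : Int) (q : Char),
      ((cs.length : Int) - j).toNat ≤ m → ((cs.length : Int) - j).toNat ≤ fa →
      pvALoop cs op cl fa j depth (some q) false =
        pvFind (pvEvents op cl (pvSkipQuote q (pvPairs cs j))) depth) := by
  intro m
  induction m with
  | zero =>
    constructor
    · intro fa j depth hm _
      have hj : ¬ j < (cs.length : Int) := by omega
      rw [pvALoop_stop cs op cl _ _ _ _ _ hj, pvPairs_nil cs j (by omega), pvEvents_nil,
        pvFind_nil]
    · intro fa j depth q hm _
      have hj : ¬ j < (cs.length : Int) := by omega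
      rw [pvALoop_stop cs op cl _ _ _ _ _ hj, pvPairs_nil cs j (by omega), pvSkipQuote_nil,
        pvEvents_nil, pvFind_nil]
  | succ m ih =>
    constructor
    · -- main mode
      intro fa j depth hm hfa
      by_cases hj : j < (cs.length : Int)
      · obtain ⟨fa', rfl⟩ : ∃ k, fa = k + 1 := ⟨fa - 1, by omega⟩
        rw [pvPairs_cons cs j hj]
        simp only [pvALoop, hj, if_true]
        by_cases hq : PySem.List.pyGetD cs j ' ' = '\'' ∨ PySem.List.pyGetD cs j ' ' = '"'
        · rw [if_pos hq, pvEvents_quote op cl _ _ _ hq]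
          exact ih.2 fa' (j + 1) depth _ (by omega) (by omega)
        · rw [if_neg hq]
          by_cases hop : [PySem.List.pyGetD cs j ' '] = op
          · rw [if_pos hop, pvEvents_open op cl _ _ _ hq hop, pvFind_open]
            exact ih.1 fa' (j + 1) (depth + 1) (by omega) (by omega)
          · rw [if_neg hop]
            by_cases hcl : [PySem.List.pyGetD cs j ' '] = cl
            · rw [if_pos hcl, pvEvents_close op cl _ _ _ hq hop hcl, pvFind_close]
              by_cases hd : depth - 1 = 0
              · rw [if_pos hd, if_pos hd]
              · rw [if_neg hd, if_neg hd]
                exact ih.1 fa' (j + 1) (depth - 1) (by omega) (by omega)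
            · rw [if_neg hcl, pvEvents_skip op cl _ _ _ hq hop hcl]
              exact ih.1 fa' (j + 1) depth (by omega) (by omega)
      · rw [pvALoop_stop cs op cl _ _ _ _ _ hj, pvPairs_nil cs j (by omega), pvEvents_nil,
          pvFind_nil]
    · -- quote mode, opened by q
      intro fa j depth q hm hfa
      by_cases hj : j < (cs.length : Int)
      · obtain ⟨fa', rfl⟩ : ∃ k, fa = k + 1 := ⟨fa - 1, by omega⟩
        rw [pvPairs_cons cs j hj]
        simp only [pvALoop, hj, if_true, Bool.false_eq_true, if_false]
        by_cases hbs : PySem.List.pyGetD cs j ' ' = '\\'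
        · by_cases hj1 : j + 1 < (cs.length : Int)
          · obtain ⟨fa'', rfl⟩ : ∃ k, fa' = k + 1 := ⟨fa' - 1, by omega⟩
            rw [if_pos hbs, pvPairs_cons cs (j + 1) hj1,
              pvSkipQuote_bs_cons q j _ _ _ hbs]
            simp only [pvALoop, hj1, if_true]
            rw [show j + 1 + 1 = j + 2 from by ring]
            exact ih.2 fa'' (j + 2) depth q (by omega) (by omega)
          · rw [if_pos hbs, pvPairs_nil cs (j + 1) (by omega),
              pvSkipQuote_bs_nil q j _ hbs, pvEvents_nil, pvFind_nil,
              pvALoop_stop cs op cl _ _ _ _ _ hj1]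
        · by_cases hq : PySem.List.pyGetD cs j ' ' = q
          · rw [if_neg hbs, if_pos hq, pvSkipQuote_close q j _ _ hbs hq]
            exact ih.1 fa' (j + 1) depth (by omega) (by omega)
          · rw [if_neg hbs, if_neg hq, pvSkipQuote_other q j _ _ hbs hq]
            exact ih.2 fa' (j + 1) depth q (by omega) (by omega)
      · rw [pvALoop_stop cs op cl _ _ _ _ _ hj, pvPairs_nil cs j (by omega), pvSkipQuote_nil,
          pvEvents_nil, pvFind_nil]

-- ===== VERDICT (by name: the statement is the Claim_ definition above) =====
theorem extract_balanced_block_spec : Claim_equal_extract_balanced_block := by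
  intro text start_at opening closing _hdom _hpre
  unfold Spec_extract_balanced_block extract_balanced_block extract_balanced_block_alt
  dsimp only
  split
  · rfl
  · rename_i h0
    have hstart : start_at ≤ (text.toList.length : Int) := by
      rcases not_or.mp h0 with ⟨-, h0b⟩
      omega
    rw [pvSkipWs_eq text.toList _ start_at hstart (le_refl _)]
    split
    · rfl
    · rw [(pvSim text.toList opening.toList closing.toList
        (((text.toList.length : Int) -
          pvFirstNonWs text.toList
            (PySem.List.pyRange start_at (text.toList.length : Int) 1)).toNat)).1 _ _ 0
        (le_refl _) (le_refl _)]
      rfl
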